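-- pv_equiv track=rewrite | github.com/seyys/advent-of-code | 2016/day18/part2.py | find_next_row
-- ===== SOURCE A (Python) =====
-- def find_next_row(previous_row):
--     previous_row = '.' + previous_row + '.'
--     next_row = ''
--     for left, centre, right in zip(previous_row[:-2], previous_row[1:-1], previous_row[2:]):
--         if (left == '^' and centre == '^' and right == '.') or \
--            (left == '.' and centre == '^' and right == '^') or \
--            (left == '^' and centre == '.' and right == '.') or \
--            (left == '.' and centre == '.' and right == '^'):
--             next_row += '^'
--         else:
--             next_row += '.'
--     return next_row
-- ===== SOURCE B (Python) =====
-- def find_next_row(previous_row):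
--     n = len(previous_row)
--     if n == 0:
--         return ''
--     c = d = 0
--     for ch in previous_row:
--         c = (c << 1) | (ch == '^')
--         d = (d << 1) | (ch == '.')
--     mask = (1 << n) - 1
--     left_c = c >> 1
--     left_d = (d >> 1) | (1 << (n - 1))
--     right_c = (c << 1) & mask
--     right_d = ((d << 1) | 1) & mask
--     nxt = (c | d) & ((left_c & right_d) | (left_d & right_c))
--     return ''.join('^' if (nxt >> (n - 1 - i)) & 1 else '.' for i in range(n))
-- ===== Notes on version B (the rewrite author's own statement) =====
-- stated objective: alternative
-- what changed: B packs the row into caret-mask and dot-mask integers in one pass and computes the entire next row at once with shifts and bitwise AND/OR (a tile is a trap exactly when its centre is a caret or dot and its two neighbours, with dot padding at the ends, are one caret and one dot), then unpacks the result bits; A instead scans character by character over a zip of three shifted slices.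
import Mathlib
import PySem

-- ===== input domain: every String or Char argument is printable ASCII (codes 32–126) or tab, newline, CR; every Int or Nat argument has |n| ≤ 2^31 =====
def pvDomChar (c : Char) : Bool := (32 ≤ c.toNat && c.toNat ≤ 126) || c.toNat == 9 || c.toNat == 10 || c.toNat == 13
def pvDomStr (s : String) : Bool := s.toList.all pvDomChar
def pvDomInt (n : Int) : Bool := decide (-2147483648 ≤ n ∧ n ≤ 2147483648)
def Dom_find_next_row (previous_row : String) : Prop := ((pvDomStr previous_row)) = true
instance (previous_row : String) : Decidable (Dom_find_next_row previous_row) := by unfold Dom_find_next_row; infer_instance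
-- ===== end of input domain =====

-- B replaces A's character-by-character triple-slice scan with whole-row bitmask arithmetic (alternative algorithm, same exact result).


-- ===== PORT A =====
def find_next_row (previous_row : String) : String :=
  let pr : List Char := ('.' :: previous_row.toList) ++ ['.']   -- '.' + previous_row + '.'
  let triples := (List.zip (PySem.List.slice pr none (some (-2))) (PySem.List.slice pr (some 1) (some (-1)))).zip (PySem.List.slice pr (some 2) none)
  String.mk (triples.foldl (fun next_row t =>
    if (t.1.1 = '^' ∧ t.1.2 = '^' ∧ t.2 = '.') ∨ (t.1.1 = '.' ∧ t.1.2 = '^' ∧ t.2 = '^') ∨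
       (t.1.1 = '^' ∧ t.1.2 = '.' ∧ t.2 = '.') ∨ (t.1.1 = '.' ∧ t.1.2 = '.' ∧ t.2 = '^')
    then next_row ++ ['^'] else next_row ++ ['.']) [])

-- ===== PORT B =====
def find_next_row_alt (previous_row : String) : String :=
  let chars := previous_row.toList
  let n := chars.length
  if n = 0 then "" else
  let cd := chars.foldl (fun (p : Nat × Nat) ch =>
      ((p.1 <<< 1) ||| (if ch = '^' then 1 else 0), (p.2 <<< 1) ||| (if ch = '.' then 1 else 0))) (0, 0)
  let c := cd.1
  let d := cd.2
  let mask := (1 <<< n) - 1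
  let leftC := c >>> 1
  let leftD := (d >>> 1) ||| (1 <<< (n - 1))
  let rightC := (c <<< 1) &&& mask
  let rightD := ((d <<< 1) ||| 1) &&& mask
  let nxt := (c ||| d) &&& ((leftC &&& rightD) ||| (leftD &&& rightC))
  String.mk ((List.range n).map (fun i => if (nxt >>> (n - 1 - i)) &&& 1 ≠ 0 then '^' else '.'))

-- ===== PRECONDITION & SPEC =====
def Spec_find_next_row (previous_row : String) (out : String) : Prop := out = find_next_row_alt previous_row
instance (previous_row : String) (out : String) : Decidable (Spec_find_next_row previous_row out) := by unfold Spec_find_next_row; infer_instance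

-- ===== CLAIM (what is proved, stated in full; the proofs are below) =====
def Claim_equal_find_next_row : Prop := ∀ (previous_row : String), Dom_find_next_row previous_row → Spec_find_next_row previous_row (find_next_row previous_row)

-- ===== LEMMAS AND PROOFS =====

lemma pv_testBit_one (m : Nat) : Nat.testBit 1 m = decide (m = 0) := by
  cases m with
  | zero => decide
  | succ k => simp [Nat.testBit_succ]

-- the bit j of the MSB-first bit accumulator built by the fold
lemma pv_fold_testBit (p : Char → Prop) [DecidablePred p] (l : List Char) :
    ∀ (acc j : Nat),
    (l.foldl (fun a ch => (a <<< 1) ||| (if p ch then 1 else 0)) acc).testBit j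
      = if j < l.length then decide (p (l.getD (l.length - 1 - j) ' ')) else acc.testBit (j - l.length) := by
  induction l with
  | nil => intro acc j; simp
  | cons ch t ih =>
    intro acc j
    simp only [List.foldl_cons, List.length_cons]
    rw [ih]
    rcases Nat.lt_trichotomy j t.length with hj | hj | hj
    · rw [if_pos hj, if_pos (show j < t.length + 1 by omega)]
      have h2 : t.length + 1 - 1 - j = (t.length - 1 - j) + 1 := by omega
      simp only [h2, List.getD_cons_succ]
    · subst hj
      rw [if_neg (show ¬ t.length < t.length by omega), if_pos (show t.length < t.length + 1 by omega)]
      have h0 : t.length - t.length = 0 := Nat.sub_self _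
      have h3 : t.length + 1 - 1 - t.length = 0 := by omega
      rw [h0]
      simp only [h3, List.getD_cons_zero, Nat.testBit_or, Nat.testBit_shiftLeft]
      by_cases hp : p ch
      · simp [hp]
      · simp [hp]
    · rw [if_neg (show ¬ j < t.length by omega), if_neg (show ¬ j < t.length + 1 by omega)]
      have h1 : j - t.length = (j - (t.length + 1)) + 1 := by omega
      rw [h1]
      simp only [Nat.testBit_or, Nat.testBit_shiftLeft]
      by_cases hp : p ch
      · simp [hp, pv_testBit_one]
      · simp [hp]

-- proof-only abbreviations for B's bit computation (after splitting the pair fold)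
def pvC (l : List Char) : Nat := l.foldl (fun a ch => (a <<< 1) ||| (if ch = '^' then 1 else 0)) 0
def pvD (l : List Char) : Nat := l.foldl (fun a ch => (a <<< 1) ||| (if ch = '.' then 1 else 0)) 0
def pvNext (l : List Char) : Nat :=
  (pvC l ||| pvD l) &&&
    (((pvC l >>> 1) &&& (((pvD l <<< 1) ||| 1) &&& ((1 <<< l.length) - 1))) |||
     (((pvD l >>> 1) ||| (1 <<< (l.length - 1))) &&& ((pvC l <<< 1) &&& ((1 <<< l.length) - 1))))

lemma pv_slice1 (l : List Char) :
    PySem.List.slice (('.' :: l) ++ ['.']) none (some (-2)) = (('.' :: l) ++ ['.']).take l.length := by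
  rw [PySem.List.slice_to_neg_ofNat _ 2 (by omega)]
  congr 1
  simp

lemma pv_slice2 (l : List Char) :
    PySem.List.slice (('.' :: l) ++ ['.']) (some 1) (some (-1)) = l := by
  simp only [PySem.List.slice, PySem.List.clampIdx]
  norm_num
  rw [if_neg (by omega), Nat.add_sub_cancel]
  exact List.take_left' rfl

lemma pv_slice3 (l : List Char) :
    PySem.List.slice (('.' :: l) ++ ['.']) (some 2) none = (l ++ ['.']).drop 1 := by
  rw [PySem.List.slice_from _ (by omega)]
  simp

lemma pv_testBit_C (l : List Char) (k : Nat) :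
    (pvC l).testBit k = if k < l.length then decide (l.getD (l.length - 1 - k) ' ' = '^') else false := by
  unfold pvC
  rw [pv_fold_testBit (fun ch => ch = '^')]
  split <;> simp

lemma pv_testBit_D (l : List Char) (k : Nat) :
    (pvD l).testBit k = if k < l.length then decide (l.getD (l.length - 1 - k) ' ' = '.') else false := by
  unfold pvD
  rw [pv_fold_testBit (fun ch => ch = '.')]
  split <;> simp

-- the pointwise fact: bit (n-1-i) of B's next-row integer decides A's trap rule at position i
lemma pv_point (l : List Char) (i : Nat) (hi : i < l.length) :
    ((pvNext l >>> (l.length - 1 - i)) &&& 1 ≠ 0)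
      ↔ (((('.' :: l) ++ ['.']).getD i ' ' = '^' ∧ l.getD i ' ' = '^' ∧ (l ++ ['.']).getD (1 + i) ' ' = '.') ∨
         ((('.' :: l) ++ ['.']).getD i ' ' = '.' ∧ l.getD i ' ' = '^' ∧ (l ++ ['.']).getD (1 + i) ' ' = '^') ∨
         ((('.' :: l) ++ ['.']).getD i ' ' = '^' ∧ l.getD i ' ' = '.' ∧ (l ++ ['.']).getD (1 + i) ' ' = '.') ∨
         ((('.' :: l) ++ ['.']).getD i ' ' = '.' ∧ l.getD i ' ' = '.' ∧ (l ++ ['.']).getD (1 + i) ' ' = '^')) := by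
  have hbit : ((pvNext l >>> (l.length - 1 - i)) &&& 1 ≠ 0) ↔ (pvNext l).testBit (l.length - 1 - i) = true := by
    rw [Nat.testBit, Nat.and_comm]
    simp [bne]
  rw [hbit]
  set n := l.length with hn
  have hLeft : (('.' :: l) ++ ['.']).getD i ' ' = (if i = 0 then '.' else l.getD (i - 1) ' ') := by
    rcases i with _ | i'
    · simp
    · rw [List.cons_append, List.getD_cons_succ, if_neg (by omega), List.getD_append _ _ _ _ (by omega)]
      simp
  have hRight : (l ++ ['.']).getD (1 + i) ' ' = (if i + 1 < n then l.getD (i + 1) ' ' else '.') := by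
    by_cases h : i + 1 < n
    · rw [if_pos h, List.getD_append _ _ _ _ (by omega)]
      congr 1; omega
    · rw [if_neg h, List.getD_append_right _ _ _ _ (by omega)]
      simp [show 1 + i - l.length = 0 from by omega]
  rw [hLeft, hRight]
  have u4 : n - 1 - (n - 1 - i) = i := by omega
  have u5 : n - 1 - (1 + (n - 1 - i)) = i - 1 := by omega
  simp only [pvNext, Nat.testBit_and, Nat.testBit_or, Nat.testBit_shiftLeft, Nat.testBit_shiftRight,
    Nat.one_shiftLeft, Nat.testBit_two_pow_sub_one, Nat.testBit_two_pow, pv_testBit_C, pv_testBit_D,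
    pv_testBit_one, ← hn, u4, u5]
  by_cases h0 : i = 0 <;> by_cases h1 : i + 1 < n
  · subst h0
    simp only [show n - 1 - (n - 1 - 0 - 1) = 0 + 1 from by omega]
    simp [show n - 1 < n from by omega, show n - 1 - 1 < n from by omega,
      show 1 ≤ n - 1 from by omega, show ¬ (n - 1 = 0) from by omega,
      show ¬ (1 + (n - 1) < n) from by omega, h1]
    tauto
  · subst h0
    -- n = 1 : single-character row, both neighbours are the padding '.'
    simp [show ¬ (1 + 0 < n) from by omega, show (0 : Nat) < n from hi,
      show n - 1 = 0 from by omega]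
  · simp only [show n - 1 - (n - 1 - i - 1) = i + 1 from by omega]
    simp [show n - 1 - i < n from by omega, show n - 1 - i - 1 < n from by omega,
      show n - 1 - i ≥ 1 from by omega, show ¬ (n - 1 - i = 0) from by omega,
      show 1 + (n - 1 - i) < n from by omega, show ¬ (n - 1 = n - 1 - i) from by omega, h0, h1]
    tauto
  · -- i = n - 1 > 0 : last position, right neighbour is the padding '.'
    simp [show n - 1 - i = 0 from by omega, show 1 + 0 < n from by omega,
      show (0 : Nat) < n from by omega, show ¬ (n - 1 = 0) from by omega, h0, h1]
    tauto

theorem find_next_row_spec_aux (previous_row : String) :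
    find_next_row previous_row = find_next_row_alt previous_row := by
  simp only [find_next_row, find_next_row_alt]
  by_cases h0 : previous_row.toList.length = 0
  · have hnil : previous_row.toList = [] := List.length_eq_zero_iff.mp h0
    rw [hnil]
    decide
  · rw [if_neg h0]
    rw [PySem.List.foldl_prod_mk (fun a ch => (a <<< 1) ||| (if ch = '^' then 1 else 0))
          (fun a ch => (a <<< 1) ||| (if ch = '.' then 1 else 0)) previous_row.toList 0 0]
    apply congrArg
    rw [show (fun (next_row : List Char) (t : (Char × Char) × Char) =>
          if (t.1.1 = '^' ∧ t.1.2 = '^' ∧ t.2 = '.') ∨ (t.1.1 = '.' ∧ t.1.2 = '^' ∧ t.2 = '^') ∨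
             (t.1.1 = '^' ∧ t.1.2 = '.' ∧ t.2 = '.') ∨ (t.1.1 = '.' ∧ t.1.2 = '.' ∧ t.2 = '^')
          then next_row ++ ['^'] else next_row ++ ['.']) =
        (fun (next_row : List Char) (t : (Char × Char) × Char) =>
          next_row ++ [if (t.1.1 = '^' ∧ t.1.2 = '^' ∧ t.2 = '.') ∨ (t.1.1 = '.' ∧ t.1.2 = '^' ∧ t.2 = '^') ∨
             (t.1.1 = '^' ∧ t.1.2 = '.' ∧ t.2 = '.') ∨ (t.1.1 = '.' ∧ t.1.2 = '.' ∧ t.2 = '^')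
          then '^' else '.']) from by
      funext acc t; split <;> rfl]
    rw [PySem.List.foldl_append_singleton_eq_map, List.nil_append]
    rw [pv_slice1, pv_slice2, pv_slice3]
    apply List.ext_getElem
    · simp; omega
    · intro i h1 h2
      simp only [List.getElem_map, List.getElem_zip, List.getElem_take, List.getElem_drop,
        List.getElem_range]
      have hi : i < previous_row.toList.length := by simpa using h2
      have hpoint := pv_point previous_row.toList i hi
      have hb1 : i < (('.' :: previous_row.toList) ++ ['.']).length := by
        simp only [List.length_append, List.length_cons]; omega
      have hb2 : 1 + i < (previous_row.toList ++ ['.']).length := by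
        simp only [List.length_append, List.length_cons]; omega
      rw [List.getD_eq_getElem (('.' :: previous_row.toList) ++ ['.']) ' ' (n := i) hb1,
          List.getD_eq_getElem previous_row.toList ' ' (n := i) hi,
          List.getD_eq_getElem (previous_row.toList ++ ['.']) ' ' (n := 1 + i) hb2] at hpoint
      have hval : (pvNext previous_row.toList) = (pvC previous_row.toList ||| pvD previous_row.toList) &&&
          (((pvC previous_row.toList >>> 1) &&& (((pvD previous_row.toList <<< 1) ||| 1) &&& ((1 <<< previous_row.toList.length) - 1))) |||
           (((pvD previous_row.toList >>> 1) ||| (1 <<< (previous_row.toList.length - 1))) &&& ((pvC previous_row.toList <<< 1) &&& ((1 <<< previous_row.toList.length) - 1)))) := rfl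
      have hc' : List.foldl (fun a ch => a <<< 1 ||| if ch = '^' then 1 else 0) 0 previous_row.toList
          = pvC previous_row.toList := rfl
      have hd' : List.foldl (fun a ch => a <<< 1 ||| if ch = '.' then 1 else 0) 0 previous_row.toList
          = pvD previous_row.toList := rfl
      rw [hc', hd']
      by_cases hcond : ((pvNext previous_row.toList >>> (previous_row.toList.length - 1 - i)) &&& 1 ≠ 0)
      · rw [if_pos (hpoint.mp hcond)]
        rw [if_pos (by rw [← hval]; exact hcond)]
      · rw [if_neg (fun hc => hcond (hpoint.mpr hc))]
        rw [if_neg (by rw [← hval]; exact hcond)]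

-- ===== VERDICT (by name: the statement is the Claim_ definition above) =====
theorem find_next_row_spec : Claim_equal_find_next_row := by
  intro s _
  exact find_next_row_spec_aux s
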